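-- pv_equiv track=rewrite | github.com/xwq610728213/zodiac_edge | reasoner/stratify.py | create_hyper_nodes
-- ===== SOURCE A (Python) =====
-- def compute_strongly_connected_components(vertex, pgraph, ngraph):
--     visited = {}
--     for node in vertex:
--         visited[node] = False
--
--     s = []
--     colored = {}
--     for node in vertex:
--         colored[node] = False
--
--     def dfs1(u, pgraph, ngraph, visited, s):
--         visited[u] = True
--         for v in pgraph[u].keys():
--             if (pgraph[u][v] or ngraph[u][v]) and visited[v] == False:
--                 dfs1(v, pgraph, ngraph, visited, s)
--         s.append(u)
--
--     def dfs2(u, colored, inversed_pgraph, inversed_ngraph, num):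
--         colored[u] = num
--         for v in inversed_pgraph[u].keys():
--             if (inversed_pgraph[u][v] or inversed_ngraph[u][v]) and colored[v] == False:
--                 dfs2(v, colored, inversed_pgraph, inversed_ngraph, num)
--
--     num = 0
--     for v in vertex:
--         if visited[v] == False:
--             dfs1(v, pgraph, ngraph, visited, s)
--
--     inversed_pgraph = {}
--     inversed_ngraph = {}
--     for v1 in vertex:
--         for v2 in vertex:
--             if v2 not in inversed_pgraph:
--                 inversed_pgraph[v2] = {}
--                 inversed_ngraph[v2] = {}
--             inversed_pgraph[v2][v1] = pgraph[v1][v2]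
--             inversed_ngraph[v2][v1] = ngraph[v1][v2]
--
--     for v in reversed(s):
--         if colored[v] == False:
--             num = num + 1
--             dfs2(v, colored, inversed_pgraph, inversed_ngraph, num)
--
--     return colored
--
-- def create_hyper_nodes(rules, positive_dependancy_graph, negative_dependancy_graph):
--     rule_to_hyper_node_map = compute_strongly_connected_components(rules, positive_dependancy_graph, negative_dependancy_graph)
--     hyper_nodes_to_rules_map = {}
--     hyper_nodes = set()
--     for k,v in rule_to_hyper_node_map.items():
--         if v not in hyper_nodes_to_rules_map:
--             hyper_nodes_to_rules_map[v] = set()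
--             hyper_nodes.add(v)
--         hyper_nodes_to_rules_map[v].add(k)
--
--     return rule_to_hyper_node_map, hyper_nodes_to_rules_map, hyper_nodes
-- ===== SOURCE B (Python) =====
-- # B: same SCC labeling, but both DFS passes are iterative with explicit stacks
-- # (same neighbor order and post-order emission as A's recursion); grouping uses setdefault.
-- def create_hyper_nodes(rules, positive_dependancy_graph, negative_dependancy_graph):
--     pgraph, ngraph = positive_dependancy_graph, negative_dependancy_graph
--
--     # pass 1: iterative post-order DFS, finishing order in s
--     visited = {r: False for r in rules}
--     s = []
--     for r in rules:
--         if visited[r] == False: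
--             visited[r] = True
--             stack = [[r, list(pgraph[r].keys()), 0]]
--             while stack:
--                 frame = stack[-1]
--                 u, vs, i = frame
--                 advanced = False
--                 while i < len(vs):
--                     v = vs[i]
--                     i += 1
--                     if (pgraph[u][v] or ngraph[u][v]) and visited[v] == False:
--                         frame[2] = i
--                         visited[v] = True
--                         stack.append([v, list(pgraph[v].keys()), 0])
--                         advanced = True
--                         break
--                 if not advanced:
--                     s.append(u)
--                     stack.pop()
--
--     # inverse graphs (same V x V construction as the original)
--     inversed_pgraph = {}
--     inversed_ngraph = {}
--     for v1 in rules: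
--         for v2 in rules:
--             if v2 not in inversed_pgraph:
--                 inversed_pgraph[v2] = {}
--                 inversed_ngraph[v2] = {}
--             inversed_pgraph[v2][v1] = pgraph[v1][v2]
--             inversed_ngraph[v2][v1] = ngraph[v1][v2]
--
--     # pass 2: iterative flood fill over reversed finishing order
--     colored = {r: 0 for r in rules}
--     num = 0
--     for root in reversed(s):
--         if colored[root] == 0:
--             num = num + 1
--             colored[root] = num
--             stack = [[root, list(inversed_pgraph[root].keys()), 0]]
--             while stack:
--                 frame = stack[-1]
--                 u, vs, i = frame
--                 advanced = False
--                 while i < len(vs):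
--                     v = vs[i]
--                     i += 1
--                     if (inversed_pgraph[u][v] or inversed_ngraph[u][v]) and colored[v] == 0:
--                         frame[2] = i
--                         colored[v] = num
--                         stack.append([v, list(inversed_pgraph[v].keys()), 0])
--                         advanced = True
--                         break
--                 if not advanced:
--                     stack.pop()
--
--     # grouping
--     hyper_nodes_to_rules_map = {}
--     for k, v in colored.items():
--         hyper_nodes_to_rules_map.setdefault(v, set()).add(k)
--     hyper_nodes = set(hyper_nodes_to_rules_map)
--     return colored, hyper_nodes_to_rules_map, hyper_nodes
-- ===== Notes on version B (the rewrite author's own statement) =====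
-- stated objective: alternative
-- what changed: Both recursive DFS passes (finishing-order pass and component flood-fill) are replaced by iterative DFS with an explicit stack of (node, remaining-neighbours) frames reproducing the same neighbour order and post-order emission, and the grouping dict is built with setdefault with the hyper-node set read off as its key set.
import Mathlib
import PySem

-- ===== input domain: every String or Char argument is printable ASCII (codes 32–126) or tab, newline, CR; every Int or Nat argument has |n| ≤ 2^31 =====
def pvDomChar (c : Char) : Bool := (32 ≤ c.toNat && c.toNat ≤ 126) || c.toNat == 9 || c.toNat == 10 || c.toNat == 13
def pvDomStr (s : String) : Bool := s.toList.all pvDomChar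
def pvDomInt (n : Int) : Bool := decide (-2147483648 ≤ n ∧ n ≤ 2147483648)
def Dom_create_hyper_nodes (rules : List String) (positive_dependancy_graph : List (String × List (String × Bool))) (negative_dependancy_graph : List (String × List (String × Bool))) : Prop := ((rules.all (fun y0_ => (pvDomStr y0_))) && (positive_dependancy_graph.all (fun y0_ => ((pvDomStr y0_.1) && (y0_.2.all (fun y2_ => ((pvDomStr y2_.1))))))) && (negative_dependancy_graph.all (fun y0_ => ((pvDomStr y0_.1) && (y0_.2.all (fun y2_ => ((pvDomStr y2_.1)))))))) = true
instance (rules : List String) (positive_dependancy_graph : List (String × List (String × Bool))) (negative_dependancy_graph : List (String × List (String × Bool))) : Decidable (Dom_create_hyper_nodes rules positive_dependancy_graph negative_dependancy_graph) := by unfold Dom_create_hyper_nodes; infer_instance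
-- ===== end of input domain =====

-- B replaces the two recursive DFS passes by explicit-stack iterative DFS with the same
-- neighbor order and post-order emission (objective: alternative; same asymptotic cost).

-- ===== SHARED HELPERS (identical Python in A and B: graph access and the V×V inversion) =====

-- a graph dict-of-dicts, as received (insertion order, first-match lookup)
def pvWrap (g : List (String × List (String × Bool))) : PySem.Dict String (PySem.Dict String Bool) :=
  PySem.Dict.mk (g.map (fun p => (p.1, PySem.Dict.mk p.2)))

-- g[u][v]; a missing key is a Python KeyError, excluded by Pre_ (false only outside Pre_)
def pvCell (g : PySem.Dict String (PySem.Dict String Bool)) (u v : String) : Bool :=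
  match g.get? u with
  | some row => row.getD v false
  | none => false

-- g[u][v1] or h[u][v2]  (the edge test of both dfs passes)
def pvEdge (g h : PySem.Dict String (PySem.Dict String Bool)) (u v : String) : Bool :=
  pvCell g u v || pvCell h u v

-- list(g[u].keys()); missing u is a Python KeyError, excluded by Pre_
def pvNbrs (g : PySem.Dict String (PySem.Dict String Bool)) (u : String) : List String :=
  match g.get? u with
  | some row => row.keys
  | none => []

-- the inverse-graph construction (this V×V loop is line-for-line identical in A and B)
def pvBuildInv (vertex : List String) (pg ng : PySem.Dict String (PySem.Dict String Bool)) :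
    PySem.Dict String (PySem.Dict String Bool) × PySem.Dict String (PySem.Dict String Bool) :=
  vertex.foldl (fun acc v1 =>
    vertex.foldl (fun acc v2 =>
      let acc := if acc.1.contains v2 then acc
                 else (acc.1.insert v2 (PySem.Dict.mk []), acc.2.insert v2 (PySem.Dict.mk []))
      (acc.1.modify v2 (PySem.Dict.mk []) (fun row => row.insert v1 (pvCell pg v1 v2)),
       acc.2.modify v2 (PySem.Dict.mk []) (fun row => row.insert v1 (pvCell ng v1 v2))))
      acc) (PySem.Dict.mk [], PySem.Dict.mk [])

-- number of entries still holding the "fresh" value (termination measure of both DFS ports)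
def pvFcnt {α : Type} [DecidableEq α] (fresh : α) (d : PySem.Dict String α) : Nat :=
  d.items.countP (fun p => decide (p.2 = fresh))

-- termination lemmas for the DFS ports (cited in their decreasing_by)
theorem pvCountP_mark_le {α : Type} [DecidableEq α] (fresh : α) (l : List (String × α))
    (u : String) (mark : α) (hne : ¬ mark = fresh) :
    (l.map (fun p => if (p.1 == u) = true then (u, mark) else p)).countP
        (fun p => decide (p.2 = fresh))
      ≤ l.countP (fun p => decide (p.2 = fresh)) := by
  induction l with
  | nil => simp
  | cons p l ih =>
    simp only [List.map_cons, List.countP_cons]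
    by_cases hp : (p.1 == u) = true
    · rw [if_pos hp]
      split_ifs with h1 h2 <;> try omega
      all_goals (exfalso; simp only [decide_eq_true_eq] at h1; exact hne h1)
    · rw [if_neg hp]
      split_ifs <;> omega

theorem pvCountP_mark_lt {α : Type} [DecidableEq α] (fresh : α) (l : List (String × α))
    (u : String) (mark : α) (q : String × α) (hne : ¬ mark = fresh)
    (hfind : l.find? (fun p => p.1 == u) = some q) (hq : q.2 = fresh) :
    (l.map (fun p => if (p.1 == u) = true then (u, mark) else p)).countP
        (fun p => decide (p.2 = fresh))
      < l.countP (fun p => decide (p.2 = fresh)) := by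
  induction l with
  | nil => simp at hfind
  | cons p l ih =>
    simp only [List.map_cons, List.countP_cons]
    by_cases hp : (p.1 == u) = true
    · simp only [List.find?_cons, hp] at hfind
      injection hfind with hfind
      subst hfind
      have hle := pvCountP_mark_le fresh l u mark hne
      rw [if_pos hp]
      split_ifs with h1 h2
      · simp only [decide_eq_true_eq] at h1; exact absurd h1 hne
      · simp only [decide_eq_true_eq] at h1; exact absurd h1 hne
      · omega
      · simp only [decide_eq_true_eq, hq, not_true] at *
    · have hp' : (p.1 == u) = false := by simpa using hp
      simp only [List.find?_cons, hp'] at hfind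
      have := ih hfind
      rw [if_neg hp]
      split_ifs <;> omega

theorem pvFcnt_insert_lt {α : Type} [DecidableEq α] (fresh : α) (d : PySem.Dict String α)
    (u : String) (mark : α) (hget : d.get? u = some fresh) (hne : ¬ mark = fresh) :
    pvFcnt fresh (d.insert u mark) < pvFcnt fresh d := by
  have hc : d.contains u = true := by
    rw [PySem.Dict.contains_eq_isSome_get?, hget]; rfl
  unfold PySem.Dict.get? at hget
  rcases hfind : List.find? (fun p => p.1 == u) d.items with _ | q
  · rw [hfind] at hget; simp at hget
  · rw [hfind] at hget
    simp only [Option.map_some, Option.some.injEq] at hget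
    unfold pvFcnt PySem.Dict.insert
    rw [if_pos hc]
    exact pvCountP_mark_lt fresh d.items u mark q hne hfind hget

-- ===== PORT A ===== (the recursive dfs1/dfs2, generic in the mark type:
-- pass 1 uses visited : Bool with fresh = false, mark = true;
-- pass 2 uses colored : Int with fresh = 0 (Python's False compares == 0), mark = num.
-- The extra '¬ mark = fresh' conjunct is a totality guard; it always holds in Python's runs.)
mutual
def dfsRec {α : Type} [DecidableEq α] (nb : String → List String) (ed : String → String → Bool)
    (fresh mark : α) (emit : Bool) (u : String) (st : PySem.Dict String α × List String) :
    {r : PySem.Dict String α × List String // pvFcnt fresh r.1 ≤ pvFcnt fresh st.1} :=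
  if h : st.1.get? u = some fresh ∧ ¬ mark = fresh then
    let r := dfsLoop nb ed fresh mark emit u (nb u) (st.1.insert u mark, st.2)
    ⟨(r.val.1, if emit then r.val.2 ++ [u] else r.val.2), by
      have h1 := r.property
      have h2 := pvFcnt_insert_lt fresh st.1 u mark h.1 h.2
      exact le_of_lt (lt_of_le_of_lt h1 h2)⟩
  else ⟨st, le_rfl⟩
termination_by (pvFcnt fresh st.1, 0)
decreasing_by
  exact Prod.Lex.left _ _ (pvFcnt_insert_lt fresh st.1 u mark h.1 h.2)

def dfsLoop {α : Type} [DecidableEq α] (nb : String → List String) (ed : String → String → Bool)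
    (fresh mark : α) (emit : Bool) (u : String) (vs : List String)
    (st : PySem.Dict String α × List String) :
    {r : PySem.Dict String α × List String // pvFcnt fresh r.1 ≤ pvFcnt fresh st.1} :=
  match vs with
  | [] => ⟨st, le_rfl⟩
  | v :: rest =>
    if ed u v ∧ st.1.get? v = some fresh then
      let r1 := dfsRec nb ed fresh mark emit v st
      let r2 := dfsLoop nb ed fresh mark emit u rest r1.val
      ⟨r2.val, le_trans r2.property r1.property⟩
    else dfsLoop nb ed fresh mark emit u rest st
termination_by (pvFcnt fresh st.1, vs.length + 1)
decreasing_by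
  all_goals first
    | exact Prod.Lex.right _ (by simp only [List.length_cons]; omega)
    | (rcases lt_or_eq_of_le r1.property with hlt | heq
       · exact Prod.Lex.left _ _ hlt
       · rw [heq]; exact Prod.Lex.right _ (by simp only [List.length_cons]; omega))
end

-- compute_strongly_connected_components, transliterated (recursive passes)
def pvScc (vertex : List String) (pg ng : PySem.Dict String (PySem.Dict String Bool)) :
    PySem.Dict String Int :=
  let visited0 : PySem.Dict String Bool :=
    vertex.foldl (fun d node => d.insert node false) (PySem.Dict.mk [])
  let colored0 : PySem.Dict String Int :=
    vertex.foldl (fun d node => d.insert node 0) (PySem.Dict.mk [])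
  let st1 := vertex.foldl (fun st v =>
      if st.1.get? v = some false then
        (dfsRec (pvNbrs pg) (pvEdge pg ng) false true true v st).val
      else st) (visited0, ([] : List String))
  let inv := pvBuildInv vertex pg ng
  let st2 := st1.2.reverse.foldl (fun (p : PySem.Dict String Int × Int) v =>
      if p.1.get? v = some 0 then
        let num' := p.2 + 1
        ((dfsRec (pvNbrs inv.1) (pvEdge inv.1 inv.2) 0 num' false v (p.1, [])).val.1, num')
      else p) (colored0, (0 : Int))
  st2.1

def create_hyper_nodes (rules : List String) (positive_dependancy_graph : List (String × List (String × Bool))) (negative_dependancy_graph : List (String × List (String × Bool))) : (List (String × Int)) × (List (Int × List String)) × List Int :=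
  let m := pvScc rules (pvWrap positive_dependancy_graph) (pvWrap negative_dependancy_graph)
  let grp := m.items.foldl (fun (acc : PySem.Dict Int (PySem.Set String) × PySem.Set Int) kv =>
      let acc := if acc.1.contains kv.2 then acc
                 else (acc.1.insert kv.2 PySem.Set.empty, PySem.Set.add acc.2 kv.2)
      (acc.1.modify kv.2 PySem.Set.empty (fun s => PySem.Set.add s kv.1), acc.2))
    (PySem.Dict.mk [], PySem.Set.empty)
  (m.items, grp.1.items, grp.2)

-- ===== PORT B ===== (iterative DFS: a stack of (node, remaining-neighbours) frames)
def dfsIter {α : Type} [DecidableEq α] (nb : String → List String) (ed : String → String → Bool)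
    (fresh mark : α) (emit : Bool) (frames : List (String × List String))
    (st : PySem.Dict String α × List String) : PySem.Dict String α × List String :=
  match frames with
  | [] => st
  | (u, vs) :: rest =>
    match vs with
    | [] => dfsIter nb ed fresh mark emit rest (st.1, if emit then st.2 ++ [u] else st.2)
    | v :: vs' =>
      if h : ed u v ∧ st.1.get? v = some fresh ∧ ¬ mark = fresh then
        dfsIter nb ed fresh mark emit ((v, nb v) :: (u, vs') :: rest) (st.1.insert v mark, st.2)
      else dfsIter nb ed fresh mark emit ((u, vs') :: rest) st
termination_by (pvFcnt fresh st.1, (frames.map (fun f => f.2.length + 1)).sum)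
decreasing_by
  all_goals first
    | exact Prod.Lex.left _ _ (pvFcnt_insert_lt fresh st.1 v mark h.2.1 h.2.2)
    | exact Prod.Lex.right _ (by simp only [List.map_cons, List.sum_cons, List.length_cons]; omega)

-- B's compute_strongly_connected_components: iterative passes
def pvSccAlt (vertex : List String) (pg ng : PySem.Dict String (PySem.Dict String Bool)) :
    PySem.Dict String Int :=
  let visited0 : PySem.Dict String Bool :=
    vertex.foldl (fun d node => d.insert node false) (PySem.Dict.mk [])
  let colored0 : PySem.Dict String Int :=
    vertex.foldl (fun d node => d.insert node 0) (PySem.Dict.mk [])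
  let st1 := vertex.foldl (fun st r =>
      if st.1.get? r = some false then
        dfsIter (pvNbrs pg) (pvEdge pg ng) false true true [(r, pvNbrs pg r)]
          (st.1.insert r true, st.2)
      else st) (visited0, ([] : List String))
  let inv := pvBuildInv vertex pg ng
  let st2 := st1.2.reverse.foldl (fun (p : PySem.Dict String Int × Int) root =>
      if p.1.get? root = some 0 then
        let num' := p.2 + 1
        ((dfsIter (pvNbrs inv.1) (pvEdge inv.1 inv.2) 0 num' false [(root, pvNbrs inv.1 root)]
            (p.1.insert root num', [])).1, num')
      else p) (colored0, (0 : Int))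
  st2.1

def create_hyper_nodes_alt (rules : List String) (positive_dependancy_graph : List (String × List (String × Bool))) (negative_dependancy_graph : List (String × List (String × Bool))) : (List (String × Int)) × (List (Int × List String)) × List Int :=
  let m := pvSccAlt rules (pvWrap positive_dependancy_graph) (pvWrap negative_dependancy_graph)
  let grp := m.items.foldl (fun (mp : PySem.Dict Int (PySem.Set String)) kv =>
      (mp.setdefault kv.2 PySem.Set.empty).modify kv.2 PySem.Set.empty
        (fun s => PySem.Set.add s kv.1)) (PySem.Dict.mk [])
  (m.items, grp.items, PySem.Set.ofList grp.keys)

-- ===== PRECONDITION & SPEC =====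
-- Pre_ excludes exactly the inputs on which the Python A raises a KeyError: every rule needs a
-- row in both graphs covering all rules, and any extra key in a positive row must have a
-- matching entry in the negative row and must be a rule whenever its edge value is true.
def pvPreRowB (rules : List String) (rp rn : PySem.Dict String Bool) : Bool :=
  rules.all (fun v => rp.keys.contains v) &&
  rules.all (fun v => rn.keys.contains v) &&
  rp.keys.all (fun v =>
    if rp.getD v false then rules.contains v
    else rn.keys.contains v && (!rn.getD v false || rules.contains v))

def pvPreB (rules : List String) (pg ng : List (String × List (String × Bool))) : Bool :=
  rules.all (fun u =>
    match PySem.Dict.get? (pvWrap pg) u, PySem.Dict.get? (pvWrap ng) u with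
    | some rp, some rn => pvPreRowB rules rp rn
    | _, _ => false)

def Pre_create_hyper_nodes (rules : List String) (positive_dependancy_graph : List (String × List (String × Bool))) (negative_dependancy_graph : List (String × List (String × Bool))) : Prop :=
  pvPreB rules positive_dependancy_graph negative_dependancy_graph = true
instance (rules : List String) (positive_dependancy_graph : List (String × List (String × Bool))) (negative_dependancy_graph : List (String × List (String × Bool))) : Decidable (Pre_create_hyper_nodes rules positive_dependancy_graph negative_dependancy_graph) := by unfold Pre_create_hyper_nodes; infer_instance

def pvWitness_create_hyper_nodes : List String × (List (String × List (String × Bool))) × (List (String × List (String × Bool))) :=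
  (["a", "b"],
   [("a", [("a", false), ("b", true)]), ("b", [("a", true), ("b", false)])],
   [("a", [("a", false), ("b", false)]), ("b", [("a", false), ("b", false)])])

def Spec_create_hyper_nodes (rules : List String) (positive_dependancy_graph : List (String × List (String × Bool))) (negative_dependancy_graph : List (String × List (String × Bool))) (out : (List (String × Int)) × (List (Int × List String)) × List Int) : Prop := out = create_hyper_nodes_alt rules positive_dependancy_graph negative_dependancy_graph
instance (rules : List String) (positive_dependancy_graph : List (String × List (String × Bool))) (negative_dependancy_graph : List (String × List (String × Bool))) (out : (List (String × Int)) × (List (Int × List String)) × List Int) : Decidable (Spec_create_hyper_nodes rules positive_dependancy_graph negative_dependancy_graph out) := by unfold Spec_create_hyper_nodes; infer_instance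

-- ===== CLAIM (what is proved, stated in full; the proofs are below) =====
def Claim_equal_create_hyper_nodes : Prop := ∀ (rules : List String) (positive_dependancy_graph : List (String × List (String × Bool))) (negative_dependancy_graph : List (String × List (String × Bool))), Dom_create_hyper_nodes rules positive_dependancy_graph negative_dependancy_graph → Pre_create_hyper_nodes rules positive_dependancy_graph negative_dependancy_graph → Spec_create_hyper_nodes rules positive_dependancy_graph negative_dependancy_graph (create_hyper_nodes rules positive_dependancy_graph negative_dependancy_graph)

-- ===== LEMMAS AND PROOFS =====

-- small unfolding lemmas for the two DFS ports (their subtype values only)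
theorem dfsRec_pos {α : Type} [DecidableEq α] (nb : String → List String)
    (ed : String → String → Bool) (fresh mark : α) (emit : Bool) (u : String)
    (st : PySem.Dict String α × List String)
    (h : st.1.get? u = some fresh ∧ ¬ mark = fresh) :
    (dfsRec nb ed fresh mark emit u st).val
      = ((dfsLoop nb ed fresh mark emit u (nb u) (st.1.insert u mark, st.2)).val.1,
         if emit then (dfsLoop nb ed fresh mark emit u (nb u) (st.1.insert u mark, st.2)).val.2 ++ [u]
         else (dfsLoop nb ed fresh mark emit u (nb u) (st.1.insert u mark, st.2)).val.2) := by
  rw [dfsRec, dif_pos h]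

theorem dfsRec_neg {α : Type} [DecidableEq α] (nb : String → List String)
    (ed : String → String → Bool) (fresh mark : α) (emit : Bool) (u : String)
    (st : PySem.Dict String α × List String)
    (h : ¬ (st.1.get? u = some fresh ∧ ¬ mark = fresh)) :
    (dfsRec nb ed fresh mark emit u st).val = st := by
  rw [dfsRec, dif_neg h]

theorem dfsLoop_cons_pos {α : Type} [DecidableEq α] {nb : String → List String}
    {ed : String → String → Bool} (fresh mark : α) (emit : Bool) {u v : String}
    (vs : List String) {st : PySem.Dict String α × List String}
    (h : ed u v ∧ st.1.get? v = some fresh) :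
    (dfsLoop nb ed fresh mark emit u (v :: vs) st).val
      = (dfsLoop nb ed fresh mark emit u vs (dfsRec nb ed fresh mark emit v st).val).val := by
  rw [dfsLoop, if_pos h]

theorem dfsLoop_cons_neg {α : Type} [DecidableEq α] {nb : String → List String}
    {ed : String → String → Bool} (fresh mark : α) (emit : Bool) {u v : String}
    (vs : List String) {st : PySem.Dict String α × List String}
    (h : ¬ (ed u v ∧ st.1.get? v = some fresh)) :
    (dfsLoop nb ed fresh mark emit u (v :: vs) st).val
      = (dfsLoop nb ed fresh mark emit u vs st).val := by
  rw [dfsLoop, if_neg h]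

-- the stack machine simulates the recursive dfs: one frame = one recursive call
theorem dfs_sim {α : Type} [DecidableEq α] (nb : String → List String) (ed : String → String → Bool)
    (fresh mark : α) (emit : Bool) (u : String) (vs : List String)
    (rest : List (String × List String)) (st : PySem.Dict String α × List String) :
    dfsIter nb ed fresh mark emit ((u, vs) :: rest) st
      = dfsIter nb ed fresh mark emit rest
          ((dfsLoop nb ed fresh mark emit u vs st).val.1,
           if emit then (dfsLoop nb ed fresh mark emit u vs st).val.2 ++ [u]
           else (dfsLoop nb ed fresh mark emit u vs st).val.2) := by
  cases vs with
  | nil =>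
    rw [dfsLoop]
    rw [dfsIter]
  | cons v vs' =>
    by_cases hg2 : ed u v ∧ st.1.get? v = some fresh
    · by_cases hm : ¬ mark = fresh
      · have hg : ed u v ∧ st.1.get? v = some fresh ∧ ¬ mark = fresh := ⟨hg2.1, hg2.2, hm⟩
        rw [dfsIter, dif_pos hg]
        rw [dfs_sim nb ed fresh mark emit v (nb v) ((u, vs') :: rest) (st.1.insert v mark, st.2)]
        rw [← dfsRec_pos nb ed fresh mark emit v st ⟨hg2.2, hm⟩]
        rw [dfs_sim nb ed fresh mark emit u vs' rest (dfsRec nb ed fresh mark emit v st).val]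
        rw [dfsLoop_cons_pos fresh mark emit vs' hg2]
      · have hg : ¬ (ed u v ∧ st.1.get? v = some fresh ∧ ¬ mark = fresh) := by
          intro hc; exact hc.2.2 (by simpa using hm)
        rw [dfsIter, dif_neg hg]
        rw [dfs_sim nb ed fresh mark emit u vs' rest st]
        rw [dfsLoop_cons_pos fresh mark emit vs' hg2]
        rw [dfsRec_neg nb ed fresh mark emit v st (by intro hc; exact hm hc.2)]
    · have hg : ¬ (ed u v ∧ st.1.get? v = some fresh ∧ ¬ mark = fresh) := by
        intro hc; exact hg2 ⟨hc.1, hc.2.1⟩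
      rw [dfsIter, dif_neg hg]
      rw [dfs_sim nb ed fresh mark emit u vs' rest st]
      rw [dfsLoop_cons_neg fresh mark emit vs' hg2]
termination_by (pvFcnt fresh st.1, vs.length)
decreasing_by
  · exact Prod.Lex.left _ _ (pvFcnt_insert_lt fresh st.1 v mark hg2.2 hm)
  · rcases lt_or_eq_of_le (dfsRec nb ed fresh mark emit v st).property with hlt | heq
    · exact Prod.Lex.left _ _ hlt
    · rw [heq]; exact Prod.Lex.right _ (by simp only [List.length_cons]; omega)
  · exact Prod.Lex.right _ (by simp only [List.length_cons]; omega)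
  · exact Prod.Lex.right _ (by simp only [List.length_cons]; omega)

-- pass-1 step functions of A and B agree
theorem pass1_step_eq (nb : String → List String) (ed : String → String → Bool)
    (st : PySem.Dict String Bool × List String) (r : String) :
    (if st.1.get? r = some false then (dfsRec nb ed false true true r st).val else st)
      = (if st.1.get? r = some false then
           dfsIter nb ed false true true [(r, nb r)] (st.1.insert r true, st.2)
         else st) := by
  by_cases hr : st.1.get? r = some false
  · rw [if_pos hr, if_pos hr]
    rw [dfs_sim nb ed false true true r (nb r) [] (st.1.insert r true, st.2)]
    rw [dfsIter]
    rw [dfsRec_pos nb ed false true true r st ⟨hr, by decide⟩]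
  · rw [if_neg hr, if_neg hr]

-- pass-2 folds of A and B agree (num stays nonnegative along the fold)
theorem pass2_fold_eq (nb : String → List String) (ed : String → String → Bool)
    (l : List String) (p : PySem.Dict String Int × Int) (hp : 0 ≤ p.2) :
    l.foldl (fun (p : PySem.Dict String Int × Int) v =>
        if p.1.get? v = some 0 then
          ((dfsRec nb ed 0 (p.2 + 1) false v (p.1, [])).val.1, p.2 + 1)
        else p) p
      = l.foldl (fun (p : PySem.Dict String Int × Int) root =>
          if p.1.get? root = some 0 then
            ((dfsIter nb ed 0 (p.2 + 1) false [(root, nb root)] (p.1.insert root (p.2 + 1), [])).1,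
             p.2 + 1)
          else p) p := by
  induction l generalizing p with
  | nil => rfl
  | cons v l ih =>
    simp only [List.foldl_cons]
    by_cases hv : p.1.get? v = some 0
    · rw [if_pos hv, if_pos hv]
      have hmark : ¬ (p.2 + 1 : Int) = 0 := by omega
      have hiter : dfsIter nb ed 0 (p.2 + 1) false [(v, nb v)] (p.1.insert v (p.2 + 1), [])
          = (dfsRec nb ed 0 (p.2 + 1) false v (p.1, [])).val := by
        rw [dfs_sim nb ed 0 (p.2 + 1) false v (nb v) [] (p.1.insert v (p.2 + 1), [])]
        rw [dfsIter]
        rw [dfsRec_pos nb ed 0 (p.2 + 1) false v (p.1, []) ⟨hv, hmark⟩]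
      rw [hiter]
      exact ih _ (by simp only []; omega)
    · rw [if_neg hv, if_neg hv]
      exact ih p hp

-- grouping: A's pair-fold versus B's map-fold plus keys
theorem group_fold_eq (items : List (String × Int)) (mp : PySem.Dict Int (PySem.Set String))
    (hs : PySem.Set Int) (hinv : hs = mp.keys) (hnd : mp.keys.Nodup) :
    items.foldl (fun (acc : PySem.Dict Int (PySem.Set String) × PySem.Set Int) kv =>
        let acc := if acc.1.contains kv.2 then acc
                   else (acc.1.insert kv.2 PySem.Set.empty, PySem.Set.add acc.2 kv.2)
        (acc.1.modify kv.2 PySem.Set.empty (fun s => PySem.Set.add s kv.1), acc.2)) (mp, hs)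
      = (items.foldl (fun (mp : PySem.Dict Int (PySem.Set String)) kv =>
           (mp.setdefault kv.2 PySem.Set.empty).modify kv.2 PySem.Set.empty
             (fun s => PySem.Set.add s kv.1)) mp,
         PySem.Set.ofList (items.foldl (fun (mp : PySem.Dict Int (PySem.Set String)) kv =>
           (mp.setdefault kv.2 PySem.Set.empty).modify kv.2 PySem.Set.empty
             (fun s => PySem.Set.add s kv.1)) mp).keys) := by
  induction items generalizing mp hs with
  | nil =>
    simp only [List.foldl_nil]
    rw [PySem.Set.ofList_eq_self_of_nodup _ hnd, hinv]
  | cons kv items ih =>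
    simp only [List.foldl_cons]
    by_cases hc : mp.contains kv.2 = true
    · rw [if_pos hc, PySem.Dict.setdefault_of_contains mp _ hc]
      have hkeys : (mp.modify kv.2 PySem.Set.empty (fun s => PySem.Set.add s kv.1)).keys = mp.keys := by
        rw [PySem.Dict.keys_modify, PySem.Dict.keys_insert_of_contains _ _ hc]
      exact ih _ _ (by rw [hinv, hkeys]) (by rw [hkeys]; exact hnd)
    · have hc' : mp.contains kv.2 = false := by simpa using hc
      rw [if_neg (by simp [hc']), PySem.Dict.setdefault_of_not_contains mp _ hc']
      have hnotmem : kv.2 ∉ mp.keys := by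
        intro hmem; rw [(PySem.Dict.contains_iff_mem_keys mp kv.2).mpr hmem] at hc'; cases hc'
      have hkeys1 : (mp.insert kv.2 PySem.Set.empty).keys = mp.keys ++ [kv.2] :=
        PySem.Dict.keys_insert_of_not_contains mp _ hc'
      have hkeys : ((mp.insert kv.2 PySem.Set.empty).modify kv.2 PySem.Set.empty
          (fun s => PySem.Set.add s kv.1)).keys = mp.keys ++ [kv.2] := by
        rw [PySem.Dict.keys_modify, PySem.Dict.keys_insert_of_contains, hkeys1]
        exact PySem.Dict.contains_insert_self mp kv.2 PySem.Set.empty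
      have hadd : PySem.Set.add hs kv.2 = mp.keys ++ [kv.2] := by
        rw [hinv]; exact PySem.Set.add_of_not_mem hnotmem
      have hnd' : (mp.keys ++ [kv.2]).Nodup :=
        List.nodup_append.mpr ⟨hnd, List.nodup_singleton _, by
          intro a ha b hb
          simp only [List.mem_singleton] at hb
          subst hb
          intro he
          exact hnotmem (he ▸ ha)⟩
      exact ih _ _ (by rw [hadd, hkeys]) (by rw [hkeys]; exact hnd')

theorem scc_eq (vertex : List String) (pg ng : PySem.Dict String (PySem.Dict String Bool)) :
    pvScc vertex pg ng = pvSccAlt vertex pg ng := by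
  unfold pvScc pvSccAlt
  simp only []
  rw [show (fun (st : PySem.Dict String Bool × List String) v =>
        if st.1.get? v = some false then
          (dfsRec (pvNbrs pg) (pvEdge pg ng) false true true v st).val
        else st)
      = (fun (st : PySem.Dict String Bool × List String) r =>
          if st.1.get? r = some false then
            dfsIter (pvNbrs pg) (pvEdge pg ng) false true true [(r, pvNbrs pg r)]
              (st.1.insert r true, st.2)
          else st) from funext fun st => funext fun r => pass1_step_eq _ _ st r]
  rw [pass2_fold_eq (pvNbrs (pvBuildInv vertex pg ng).1)
        (pvEdge (pvBuildInv vertex pg ng).1 (pvBuildInv vertex pg ng).2) _ _ le_rfl]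

-- ===== VERDICT (by name: the statement is the Claim_ definition above) =====
theorem create_hyper_nodes_spec : Claim_equal_create_hyper_nodes := by
  intro rules pg ng _ _
  show create_hyper_nodes rules pg ng = create_hyper_nodes_alt rules pg ng
  unfold create_hyper_nodes create_hyper_nodes_alt
  rw [scc_eq]
  show ((pvSccAlt rules (pvWrap pg) (pvWrap ng)).items,
      ((pvSccAlt rules (pvWrap pg) (pvWrap ng)).items.foldl
        (fun (acc : PySem.Dict Int (PySem.Set String) × PySem.Set Int) kv =>
          let acc := if acc.1.contains kv.2 then acc
                     else (acc.1.insert kv.2 PySem.Set.empty, PySem.Set.add acc.2 kv.2)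
          (acc.1.modify kv.2 PySem.Set.empty (fun s => PySem.Set.add s kv.1), acc.2))
        (PySem.Dict.mk [], PySem.Set.empty)).1.items,
      ((pvSccAlt rules (pvWrap pg) (pvWrap ng)).items.foldl
        (fun (acc : PySem.Dict Int (PySem.Set String) × PySem.Set Int) kv =>
          let acc := if acc.1.contains kv.2 then acc
                     else (acc.1.insert kv.2 PySem.Set.empty, PySem.Set.add acc.2 kv.2)
          (acc.1.modify kv.2 PySem.Set.empty (fun s => PySem.Set.add s kv.1), acc.2))
        (PySem.Dict.mk [], PySem.Set.empty)).2)
    = ((pvSccAlt rules (pvWrap pg) (pvWrap ng)).items,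
      ((pvSccAlt rules (pvWrap pg) (pvWrap ng)).items.foldl
        (fun (mp : PySem.Dict Int (PySem.Set String)) kv =>
          (mp.setdefault kv.2 PySem.Set.empty).modify kv.2 PySem.Set.empty
            (fun s => PySem.Set.add s kv.1)) (PySem.Dict.mk [])).items,
      PySem.Set.ofList ((pvSccAlt rules (pvWrap pg) (pvWrap ng)).items.foldl
        (fun (mp : PySem.Dict Int (PySem.Set String)) kv =>
          (mp.setdefault kv.2 PySem.Set.empty).modify kv.2 PySem.Set.empty
            (fun s => PySem.Set.add s kv.1)) (PySem.Dict.mk [])).keys)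
  rw [group_fold_eq _ (PySem.Dict.mk []) PySem.Set.empty rfl List.nodup_nil]
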